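-- pv_equiv track=rewrite | github.com/ZiHimm/PPT-processor | table_reassembler.py | group_by_rows
-- ===== SOURCE A (Python) =====
-- from typing import List, Dict
--
-- def group_by_rows(cells: List[Dict], tolerance: int = 20000) -> List[List[Dict]]:
--     """Group cells by similar vertical position (same row)."""
--     if not cells:
--         return []
--
--     # Sort by vertical position
--     cells.sort(key=lambda x: x["top"])
--
--     rows = []
--     current_row = [cells[0]]
--
--     for cell in cells[1:]:
--         if abs(cell["top"] - current_row[-1]["top"]) <= tolerance:
--             current_row.append(cell)
--         else:
--             rows.append(current_row)
--             current_row = [cell]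
--
--     rows.append(current_row)
--     return rows
-- ===== SOURCE B (Python) =====
-- from typing import List, Dict
--
-- def group_by_rows(cells: List[Dict], tolerance: int = 20000) -> List[List[Dict]]:
--     """Group cells by similar vertical position (same row).
--
--     Two staged passes instead of an accumulate-into-current_row loop: first
--     label every sorted cell with a row number (a running count of the gaps
--     larger than the tolerance), then bucket the cells by label in a dict and
--     return the buckets in label order (= dict insertion order, since the
--     labels are nondecreasing).
--     """
--     if not cells:
--         return []
--     cells.sort(key=lambda x: x["top"])
--     labels = [0]
--     for prev, cur in zip(cells, cells[1:]):
--         labels.append(labels[-1] + (abs(cur["top"] - prev["top"]) > tolerance))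
--     buckets: Dict[int, List[Dict]] = {}
--     for lab, cell in zip(labels, cells):
--         buckets.setdefault(lab, []).append(cell)
--     return list(buckets.values())
-- ===== Notes on version B (the rewrite author's own statement) =====
-- stated objective: alternative
-- what changed: Replaces the single accumulate-into-current_row scan with two staged passes: a labeling pass that assigns each sorted cell a row number (running count of over-tolerance gaps between consecutive cells), then a dict-bucketing pass that groups cells by label and returns the buckets in insertion order; no conditional row construction remains.
import Mathlib
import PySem

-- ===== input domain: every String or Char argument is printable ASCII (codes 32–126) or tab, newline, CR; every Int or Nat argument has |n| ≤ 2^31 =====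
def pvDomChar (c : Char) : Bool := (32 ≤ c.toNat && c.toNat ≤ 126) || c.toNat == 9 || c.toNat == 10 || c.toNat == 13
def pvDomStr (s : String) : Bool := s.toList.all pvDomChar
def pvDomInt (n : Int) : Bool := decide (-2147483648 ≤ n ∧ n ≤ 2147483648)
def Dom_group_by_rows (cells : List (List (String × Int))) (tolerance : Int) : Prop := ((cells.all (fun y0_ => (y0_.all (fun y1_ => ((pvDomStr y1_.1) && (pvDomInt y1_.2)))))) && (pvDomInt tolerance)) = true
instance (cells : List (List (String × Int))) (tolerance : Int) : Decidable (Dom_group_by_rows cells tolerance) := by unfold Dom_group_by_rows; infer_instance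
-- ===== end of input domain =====

-- B replaces A's accumulate-into-current_row scan by two staged passes (label each sorted cell
-- with a row number, then bucket by label in a dict); equivalence is about the RETURN value only
-- (both Pythons sort `cells` in place).

-- ===== PORT A =====
-- cell["top"]: first match in the association list; Pre_ guarantees the key is present
def pvTop (c : List (String × Int)) : Int :=
  ((c.find? (fun p => p.1 == "top")).map (·.2)).getD 0

-- A's loop body: extend current_row or flush it and start a new one
def pvStepA (tolerance : Int)
    (st : List (List (List (String × Int))) × List (List (String × Int)))
    (cell : List (String × Int)) :
    List (List (List (String × Int))) × List (List (String × Int)) :=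
  if |pvTop cell - pvTop (st.2.getLastD [])| ≤ tolerance then
    (st.1, st.2 ++ [cell])
  else
    (st.1 ++ [st.2], [cell])

def group_by_rows (cells : List (List (String × Int))) (tolerance : Int) : List (List (List (String × Int))) :=
  if cells.isEmpty then [] else
  match PySem.List.sorted cells (fun c => pvTop c) with
  | [] => []
  | c0 :: rest =>
    let st := rest.foldl (pvStepA tolerance) ([], [c0])
    st.1 ++ [st.2]

-- ===== PORT B =====
-- labeling pass: labels.append(labels[-1] + (abs(cur["top"] - prev["top"]) > tolerance))
def pvLabStep (tolerance : Int) (acc : List Int)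
    (p : List (String × Int) × List (String × Int)) : List Int :=
  acc ++ [acc.getLastD 0 + (if tolerance < |pvTop p.2 - pvTop p.1| then 1 else 0)]

-- bucketing pass: buckets.setdefault(lab, []).append(cell)
def pvBucketStep (d : PySem.Dict Int (List (List (String × Int))))
    (p : Int × List (String × Int)) : PySem.Dict Int (List (List (String × Int))) :=
  d.modify p.1 [] (· ++ [p.2])

def group_by_rows_alt (cells : List (List (String × Int))) (tolerance : Int) : List (List (List (String × Int))) :=
  if cells.isEmpty then [] else
  let s := PySem.List.sorted cells (fun c => pvTop c)
  let labels := (s.zip s.tail).foldl (pvLabStep tolerance) [0]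
  ((labels.zip s).foldl pvBucketStep PySem.Dict.empty).values

-- ===== PRECONDITION & SPEC =====
-- Pre_ excludes only inputs where A raises: a cell without a "top" key makes the sort key
-- (and the comparisons) raise KeyError.
def Pre_group_by_rows (cells : List (List (String × Int))) (tolerance : Int) : Prop :=
  cells.all (fun c => (c.find? (fun p => p.1 == "top")).isSome) = true
instance (cells : List (List (String × Int))) (tolerance : Int) : Decidable (Pre_group_by_rows cells tolerance) := by unfold Pre_group_by_rows; infer_instance
def pvWitness_group_by_rows : (List (List (String × Int))) × Int :=
  ([[("top", 50), ("text", 1)], [("top", 5)], [("top", 12)]], 10)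

def Spec_group_by_rows (cells : List (List (String × Int))) (tolerance : Int) (out : List (List (List (String × Int)))) : Prop := out = group_by_rows_alt cells tolerance
instance (cells : List (List (String × Int))) (tolerance : Int) (out : List (List (List (String × Int)))) : Decidable (Spec_group_by_rows cells tolerance out) := by unfold Spec_group_by_rows; infer_instance

-- ===== CLAIM (what is proved, stated in full; the proofs are below) =====
def Claim_equal_group_by_rows : Prop := ∀ (cells : List (List (String × Int))) (tolerance : Int), Dom_group_by_rows cells tolerance → Pre_group_by_rows cells tolerance → Spec_group_by_rows cells tolerance (group_by_rows cells tolerance)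

-- ===== LEMMAS AND PROOFS =====

-- The chain grouping both programs compute on the sorted list: `grp tol c xs` returns the row
-- started by `c` (first component, always headed by `c`) and the remaining rows.
def grp (tol : Int) (c : List (String × Int)) : List (List (String × Int)) → List (List (String × Int)) × List (List (List (String × Int)))
  | [] => ([c], [])
  | x :: xs =>
    let p := grp tol x xs
    if |pvTop x - pvTop c| ≤ tol then (c :: p.1, p.2) else ([c], p.1 :: p.2)

theorem grp_fst_cons (tol : Int) (c : List (String × Int)) (xs : List (List (String × Int))) :
    (grp tol c xs).1 = c :: (grp tol c xs).1.tail := by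
  cases xs with
  | nil => rfl
  | cons x xs => simp only [grp]; split <;> rfl

theorem grp_snd_ne (tol : Int) (xs : List (List (String × Int))) :
    ∀ (c : List (String × Int)), ∀ r ∈ (grp tol c xs).2, r ≠ [] := by
  induction xs with
  | nil => intro c r hr; simp [grp] at hr
  | cons x xs ih =>
    intro c r hr
    simp only [grp] at hr
    split at hr
    · exact ih x r hr
    · rcases List.mem_cons.mp hr with h | h
      · subst h; rw [grp_fst_cons tol x xs]; simp
      · exact ih x r h

theorem foldlA_eq_grp (tol : Int) (xs : List (List (String × Int))) :
    ∀ (rows : List (List (List (String × Int)))) (cur : List (List (String × Int))) (c : List (String × Int)),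
      cur ≠ [] → cur.getLastD [] = c →
      ((xs.foldl (pvStepA tol) (rows, cur)).1 ++ [(xs.foldl (pvStepA tol) (rows, cur)).2]) = rows ++ ((cur ++ (grp tol c xs).1.tail) :: (grp tol c xs).2) := by
  induction xs with
  | nil => intro rows cur c _ _; simp [grp]
  | cons x xs ih =>
    intro rows cur c hne hlast
    simp only [List.foldl_cons, pvStepA, hlast, grp]
    by_cases h : |pvTop x - pvTop c| ≤ tol
    · simp only [h, if_pos]
      rw [ih rows (cur ++ [x]) x (by simp) (by simp)]
      rw [grp_fst_cons tol x xs]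
      simp
    · simp only [h, if_neg, not_false_iff]
      rw [ih (rows ++ [cur]) [x] x (by simp) (by simp)]
      rw [grp_fst_cons tol x xs]
      simp

-- B's labeling pass, as (label, cell) pairs along the chain
def lab (tol : Int) (k : Int) (c : List (String × Int)) : List (List (String × Int)) → List (Int × List (String × Int))
  | [] => []
  | x :: xs =>
    if |pvTop x - pvTop c| ≤ tol then (k, x) :: lab tol k x xs
    else (k + 1, x) :: lab tol (k + 1) x xs

-- the rows flattened with their labels
def rowsPairs (k : Int) : List (List (List (String × Int))) → List (Int × List (String × Int))
  | [] => []
  | r :: rs => r.map (fun y => (k, y)) ++ rowsPairs (k + 1) rs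

-- the final dict's items: one entry per row, keyed k, k+1, …
def rowsItems (k : Int) : List (List (List (String × Int))) → List (Int × List (List (String × Int)))
  | [] => []
  | r :: rs => (k, r) :: rowsItems (k + 1) rs

theorem labels_fold (tol : Int) (xs : List (List (String × Int))) :
    ∀ (c : List (String × Int)) (acc : List Int) (k : Int),
      acc.getLastD 0 = k →
      ((c :: xs).zip xs).foldl (pvLabStep tol) acc = acc ++ (lab tol k c xs).map (·.1) := by
  induction xs with
  | nil => intro c acc k _; simp [lab]
  | cons x xs ih =>
    intro c acc k hlast
    have hz : ((c :: x :: xs).zip (x :: xs)) = (c, x) :: ((x :: xs).zip xs) := rfl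
    rw [hz, List.foldl_cons]
    simp only [pvLabStep, hlast]
    by_cases h : |pvTop x - pvTop c| ≤ tol
    · rw [if_neg (not_lt.mpr h)]
      rw [ih x (acc ++ [k + 0]) k (by simp)]
      simp [lab, h]
    · rw [if_pos (not_le.mp h)]
      rw [ih x (acc ++ [k + 1]) (k + 1) (by simp)]
      simp [lab, h]

theorem zip_fst_lab (tol : Int) (xs : List (List (String × Int))) :
    ∀ (c : List (String × Int)) (k : Int),
      ((lab tol k c xs).map (·.1)).zip xs = lab tol k c xs := by
  induction xs with
  | nil => intro c k; rfl
  | cons x xs ih =>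
    intro c k
    simp only [lab]
    by_cases h : |pvTop x - pvTop c| ≤ tol
    · simp only [h, if_pos, List.map_cons, List.zip_cons_cons, ih x k]
    · simp only [h, if_neg, not_false_iff, List.map_cons, List.zip_cons_cons, ih x (k + 1)]

theorem lab_eq_rowsPairs (tol : Int) (xs : List (List (String × Int))) :
    ∀ (c : List (String × Int)) (k : Int),
      (k, c) :: lab tol k c xs = rowsPairs k ((grp tol c xs).1 :: (grp tol c xs).2) := by
  induction xs with
  | nil => intro c k; simp [lab, grp, rowsPairs]
  | cons x xs ih =>
    intro c k
    have hr : ∀ (m : Int) r rs, rowsPairs m (r :: rs) = r.map (fun y => (m, y)) ++ rowsPairs (m + 1) rs :=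
      fun _ _ _ => rfl
    simp only [lab, grp]
    by_cases h : |pvTop x - pvTop c| ≤ tol
    · simp only [h, if_pos]
      rw [hr, List.map_cons, List.cons_append, ← hr, ← ih x k]
    · simp only [h, if_neg, not_false_iff]
      rw [hr, ← ih x (k + 1)]
      simp

theorem bucket_row (r : List (List (String × Int))) :
    ∀ (k : Int) (d : PySem.Dict Int (List (List (String × Int))))
      (base : List (Int × List (List (String × Int)))) (v : List (List (String × Int))),
      d.items = base ++ [(k, v)] → (∀ p ∈ base, p.1 ≠ k) →
      ((r.map (fun y => (k, y))).foldl pvBucketStep d).items = base ++ [(k, v ++ r)] := by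
  induction r with
  | nil => intro k d base v hd _; simpa using hd
  | cons y t ih =>
    intro k d base v hd hbase
    have hfind : d.items.find? (fun p => p.1 == k) = some (k, v) := by
      rw [hd, List.find?_append]
      have h1 : base.find? (fun p => p.1 == k) = none :=
        List.find?_eq_none.mpr (fun p hp => by simpa using hbase p hp)
      simp [h1]
    have hget : d.getD k [] = v := by
      simp [PySem.Dict.getD, PySem.Dict.get?, hfind]
    have hcont : d.contains k = true := by
      simp only [PySem.Dict.contains, List.any_eq_true]
      exact ⟨(k, v), by rw [hd]; simp, by simp⟩
    have hitems : (d.modify k [] (· ++ [y])).items = base ++ [(k, v ++ [y])] := by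
      simp only [PySem.Dict.modify, hget]
      rw [PySem.Dict.items_insert_of_contains d _ hcont, hd]
      rw [List.map_append]
      congr 1
      · conv_rhs => rw [← List.map_id base]
        exact List.map_congr_left (fun p hp => by simp [hbase p hp])
      · simp
    simp only [List.map_cons, List.foldl_cons, pvBucketStep]
    rw [ih k _ base (v ++ [y]) hitems hbase]
    simp

theorem bucket_rows (rows : List (List (List (String × Int)))) :
    ∀ (k : Int) (d : PySem.Dict Int (List (List (String × Int)))),
      (∀ r ∈ rows, r ≠ []) → (∀ p ∈ d.items, p.1 < k) →
      ((rowsPairs k rows).foldl pvBucketStep d).items = d.items ++ rowsItems k rows := by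
  induction rows with
  | nil => intro k d _ _; simp [rowsPairs, rowsItems]
  | cons r rs ih =>
    intro k d hne hlt
    cases r with
    | nil => exact absurd rfl (hne [] (by simp))
    | cons y t =>
      simp only [rowsPairs, List.foldl_append, List.map_cons, List.foldl_cons]
      have hcont : d.contains k = false := by
        simp only [PySem.Dict.contains, List.any_eq_false]
        intro p hp
        have := hlt p hp
        simp only [beq_iff_eq]
        omega
      have hget : d.getD k [] = ([] : List (List (String × Int))) :=
        PySem.Dict.getD_of_not_contains d [] hcont
      have hd1 : (pvBucketStep d (k, y)).items = d.items ++ [(k, [y])] := by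
        simp only [pvBucketStep, PySem.Dict.modify, hget]
        exact PySem.Dict.items_insert_of_not_contains d _ hcont
      have hrow := bucket_row t k (pvBucketStep d (k, y)) d.items [y] hd1
        (fun p hp => by have := hlt p hp; omega)
      have hd2 : (List.foldl pvBucketStep (pvBucketStep d (k, y)) (t.map (fun y => (k, y)))).items
          = d.items ++ [(k, y :: t)] := by
        rw [hrow]; simp
      rw [ih (k + 1) _ (fun r hr => hne r (by simp [hr]))
        (by intro p hp
            rw [hd2] at hp
            rcases List.mem_append.mp hp with h | h
            · have := hlt p h; omega
            · simp only [List.mem_singleton] at h; subst h; exact lt_add_one k)]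
      rw [hd2]
      simp [rowsItems]

theorem map_snd_rowsItems (rows : List (List (List (String × Int)))) :
    ∀ (k : Int), (rowsItems k rows).map (·.2) = rows := by
  induction rows with
  | nil => intro k; rfl
  | cons r rs ih => intro k; simp [rowsItems, ih (k + 1)]

theorem group_by_rows_eq_alt (cells : List (List (String × Int))) (tolerance : Int) :
    group_by_rows cells tolerance = group_by_rows_alt cells tolerance := by
  unfold group_by_rows group_by_rows_alt
  by_cases hc : cells.isEmpty
  · simp [hc]
  · simp only [hc, if_neg, Bool.false_eq_true, not_false_iff]
    have hlen : (PySem.List.sorted cells (fun c => pvTop c) (reverse := false)).length = cells.length :=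
      PySem.List.length_sorted ..
    cases hs : PySem.List.sorted cells (fun c => pvTop c) with
    | nil =>
      exfalso
      rw [hs] at hlen
      simp only [List.length_nil] at hlen
      rw [List.isEmpty_iff, ← List.length_eq_zero_iff] at hc
      omega
    | cons c0 rest =>
      dsimp only
      -- A side
      rw [foldlA_eq_grp tolerance rest [] [c0] c0 (by simp) (by simp)]
      rw [grp_fst_cons tolerance c0 rest]
      -- B side
      rw [show (c0 :: rest).tail = rest from rfl]
      rw [labels_fold tolerance rest c0 [0] 0 (by simp)]
      have hzip : ((([0] : List Int) ++ (lab tolerance 0 c0 rest).map (fun p => p.1)).zip (c0 :: rest))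
          = (0, c0) :: lab tolerance 0 c0 rest := by
        rw [List.singleton_append, List.zip_cons_cons, zip_fst_lab tolerance rest c0 0]
      rw [hzip, lab_eq_rowsPairs tolerance rest c0 0]
      simp only [PySem.Dict.values]
      rw [bucket_rows ((grp tolerance c0 rest).1 :: (grp tolerance c0 rest).2) 0 PySem.Dict.empty
        (by intro r hr
            rcases List.mem_cons.mp hr with h | h
            · subst h; rw [grp_fst_cons tolerance c0 rest]; simp
            · exact grp_snd_ne tolerance rest c0 r h)
        (by intro p hp; simp [PySem.Dict.empty] at hp)]
      rw [show (PySem.Dict.empty : PySem.Dict Int (List (List (String × Int)))).items = [] from rfl]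
      simp only [List.nil_append]
      rw [map_snd_rowsItems]
      rw [grp_fst_cons tolerance c0 rest]
      simp

-- ===== VERDICT (by name: the statement is the Claim_ definition above) =====
theorem group_by_rows_spec : Claim_equal_group_by_rows := by
  intro cells tolerance _ _
  unfold Spec_group_by_rows
  exact group_by_rows_eq_alt cells tolerance
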